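-- pv_equiv track=rewrite | github.com/deepblue21zin/radar-tracking-system | src/visualization/runtime_log_overview.py | _zero_value_streaks
-- ===== SOURCE A (Python) =====
-- from typing import Iterable, List, Optional, Sequence, Tuple
--
-- def _zero_value_streaks(values: Sequence[int], min_len: int = 20) -> List[Tuple[int, int]]:
--     streaks: List[Tuple[int, int]] = []
--     start: Optional[int] = None
--     for idx, value in enumerate(values):
--         if value == 0:
--             if start is None:
--                 start = idx
--             continue
--         if start is not None and idx - start >= min_len:
--             streaks.append((start, idx - 1))
--         start = None
--     if start is not None and len(values) - start >= min_len:
--         streaks.append((start, len(values) - 1))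
--     return streaks
-- ===== SOURCE B (Python) =====
-- from typing import List, Sequence, Tuple
--
-- def _zero_value_streaks(values: Sequence[int], min_len: int = 20) -> List[Tuple[int, int]]:
--     # Boundary detection: a streak start is a zero whose predecessor is nonzero
--     # (padding with a nonzero on the left), a streak end is a zero whose successor
--     # is nonzero (padding on the right); zip the k-th start with the k-th end.
--     vals = list(values)
--     starts = [i for i, (prev, v) in enumerate(zip([1] + vals, vals)) if v == 0 and prev != 0]
--     ends = [i for i, (v, nxt) in enumerate(zip(vals, vals[1:] + [1])) if v == 0 and nxt != 0]
--     return [(s, e) for s, e in zip(starts, ends) if e - s + 1 >= min_len]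
-- ===== Notes on version B (the rewrite author's own statement) =====
-- stated objective: alternative
-- what changed: Replaced A's stateful scan (sentinel start=None, emit on run termination plus a post-loop flush) by boundary detection: compute the list of streak starts (zero with nonzero predecessor, left-padded) and streak ends (zero with nonzero successor, right-padded) as two shifted-zip comprehensions, then zip the k-th start with the k-th end and filter by length.
import Mathlib
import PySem

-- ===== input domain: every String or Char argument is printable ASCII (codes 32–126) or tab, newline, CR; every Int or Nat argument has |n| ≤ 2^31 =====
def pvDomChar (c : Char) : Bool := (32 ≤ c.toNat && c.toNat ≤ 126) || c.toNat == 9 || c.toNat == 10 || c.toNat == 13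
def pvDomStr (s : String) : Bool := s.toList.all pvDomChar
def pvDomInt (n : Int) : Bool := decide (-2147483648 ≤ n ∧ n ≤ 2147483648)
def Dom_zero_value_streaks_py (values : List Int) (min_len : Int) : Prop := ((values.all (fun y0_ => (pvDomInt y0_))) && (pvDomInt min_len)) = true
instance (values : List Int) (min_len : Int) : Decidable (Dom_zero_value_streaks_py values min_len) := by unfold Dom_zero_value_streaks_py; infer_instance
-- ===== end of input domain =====

-- B replaces A's stateful scan (start=None sentinel + post-loop flush) by boundary detection: lists of streak starts and streak ends from shifted zips, paired positionally and filtered by length (alternative decomposition; same O(n) cost).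


-- ===== PORT A =====
-- A's for-loop over enumerate(values) as structural recursion over the same state (streaks, idx, start).
def zvLoop (min_len : Int) : List Int → Int → Option Int → List (Int × Int) → List (Int × Int) × Option Int
  | [], _, start, streaks => (streaks, start)
  | v :: rest, idx, start, streaks =>
    if v == 0 then
      zvLoop min_len rest (idx + 1) (match start with | none => some idx | some s => some s) streaks
    else
      match start with
      | some s =>
          zvLoop min_len rest (idx + 1) none
            (if idx - s ≥ min_len then streaks ++ [(s, idx - 1)] else streaks)
      | none => zvLoop min_len rest (idx + 1) none streaks

def zero_value_streaks_py (values : List Int) (min_len : Int) : List (Int × Int) :=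
  match zvLoop min_len values 0 none [] with
  | (streaks, some s) =>
      if (values.length : Int) - s ≥ min_len then streaks ++ [(s, (values.length : Int) - 1)] else streaks
  | (streaks, none) => streaks

-- ===== PORT B =====
-- Source B: starts/ends comprehensions over enumerate(zip(shifted, vals)); vals[1:] ported as .tail (exact: slice from 1).
def zero_value_streaks_py_alt (values : List Int) (min_len : Int) : List (Int × Int) :=
  let starts := (PySem.List.enumerate (List.zip ((1 : Int) :: values) values) 0).filterMap
      (fun iv => if iv.2.2 == 0 && !(iv.2.1 == 0) then some iv.1 else none)
  let ends := (PySem.List.enumerate (List.zip values (values.tail ++ [1])) 0).filterMap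
      (fun iv => if iv.2.1 == 0 && !(iv.2.2 == 0) then some iv.1 else none)
  (starts.zip ends).filter (fun se => decide (se.2 - se.1 + 1 ≥ min_len))

-- ===== PRECONDITION & SPEC =====
def Spec_zero_value_streaks_py (values : List Int) (min_len : Int) (out : List (Int × Int)) : Prop := out = zero_value_streaks_py_alt values min_len
instance (values : List Int) (min_len : Int) (out : List (Int × Int)) : Decidable (Spec_zero_value_streaks_py values min_len out) := by unfold Spec_zero_value_streaks_py; infer_instance

-- ===== CLAIM (what is proved, stated in full; the proofs are below) =====
def Claim_equal_zero_value_streaks_py : Prop := ∀ (values : List Int) (min_len : Int), Dom_zero_value_streaks_py values min_len → Spec_zero_value_streaks_py values min_len (zero_value_streaks_py values min_len)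

-- ===== LEMMAS AND PROOFS =====

-- run-length decomposition of the input (proof device shared by both sides)
def countLead (b : Bool) : List Int → Nat
  | [] => 0
  | y :: ys => if (y == 0) = b then countLead b ys + 1 else 0

def zvGroups : List Int → List (Bool × Nat)
  | [] => []
  | x :: xs =>
      let b := x == 0
      let n := countLead b xs
      (b, n + 1) :: zvGroups (xs.drop n)
  termination_by xs => xs.length
  decreasing_by simp

-- one iteration of A's loop at the granularity of a whole group
def zstep (min_len : Int) (acc : List (Int × Int) × Int) (g : Bool × Nat) : List (Int × Int) × Int :=
  if g.1 && decide ((g.2 : Int) ≥ min_len) then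
    (acc.1 ++ [(acc.2, acc.2 + (g.2 : Int) - 1)], acc.2 + (g.2 : Int))
  else
    (acc.1, acc.2 + (g.2 : Int))

-- A's post-loop flush, with `totEnd` the total length offset (idx + remaining length).
def aFin (m totEnd : Int) : List (Int × Int) × Option Int → List (Int × Int)
  | (st, some s) => if totEnd - s ≥ m then st ++ [(s, totEnd - 1)] else st
  | (st, none) => st

-- the zero runs as (start, end) index pairs, and the min_len-selected ones
def runsN : Int → List (Bool × Nat) → List (Int × Int)
  | _, [] => []
  | off, (b, n) :: gs => (if b then [(off, off + (n : Int) - 1)] else []) ++ runsN (off + n) gs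

def selRuns (m : Int) : Int → List (Bool × Nat) → List (Int × Int)
  | _, [] => []
  | off, (b, n) :: gs =>
      (if b && decide ((n : Int) ≥ m) then [(off, off + (n : Int) - 1)] else []) ++ selRuns m (off + n) gs

-- structural forms of B's two comprehensions
def sAux : Int → Int → List Int → List Int
  | _, _, [] => []
  | i, p, y :: ys => (if y == 0 && !(p == 0) then [i] else []) ++ sAux (i + 1) y ys

def eAux : Int → List Int → List Int
  | _, [] => []
  | i, y :: ys => (if y == 0 && !((ys.headD 1) == 0) then [i] else []) ++ eAux (i + 1) ys

lemma zvGroups_nil : zvGroups [] = [] := by rw [zvGroups]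

lemma zvGroups_cons (x : Int) (xs : List Int) :
    zvGroups (x :: xs)
      = ((x == 0), countLead (x == 0) xs + 1) :: zvGroups (xs.drop (countLead (x == 0) xs)) := by
  rw [zvGroups]

lemma countLead_le (b : Bool) (xs : List Int) : countLead b xs ≤ xs.length := by
  induction xs with
  | nil => simp [countLead]
  | cons y ys ih => by_cases h : (y == 0) = b <;> simp [countLead, h] <;> omega

lemma mem_take_countLead (b : Bool) (xs : List Int) :
    ∀ y ∈ xs.take (countLead b xs), (y == 0) = b := by
  induction xs with
  | nil => simp
  | cons z zs ih =>
      by_cases h : (z == 0) = b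
      · have hc : countLead b (z :: zs) = countLead b zs + 1 := by simp [countLead, h]
        rw [hc, List.take_succ_cons]
        intro y hy
        rcases List.mem_cons.mp hy with rfl | hy
        · exact h
        · exact ih y hy
      · have hc : countLead b (z :: zs) = 0 := by simp [countLead, h]
        rw [hc]
        simp

lemma drop_countLead_head (b : Bool) (xs : List Int) (y : Int) (ys : List Int)
    (h : xs.drop (countLead b xs) = y :: ys) : ¬ ((y == 0) = b) := by
  induction xs generalizing ys with
  | nil => simp at h
  | cons z zs ih =>
      by_cases hz : (z == 0) = b
      · have hc : countLead b (z :: zs) = countLead b zs + 1 := by simp [countLead, hz]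
        rw [hc, List.drop_succ_cons] at h
        exact ih _ h
      · have hc : countLead b (z :: zs) = 0 := by simp [countLead, hz]
        rw [hc, List.drop_zero] at h
        injection h with h1 h2
        subst h1
        exact hz

lemma skip_nonzero (m : Int) (ys : List Int) (h : ∀ y ∈ ys, (y == 0) = false) :
    ∀ rest idx st, zvLoop m (ys ++ rest) idx none st = zvLoop m rest (idx + ys.length) none st := by
  induction ys with
  | nil => intro rest idx st; simp
  | cons y ys ih =>
      intro rest idx st
      have hy : (y == 0) = false := h y (by simp)
      have he : idx + (((y :: ys).length : Nat) : Int) = (idx + 1) + (ys.length : Int) := by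
        simp only [List.length_cons]; push_cast; ring
      rw [he]
      simp only [List.cons_append, zvLoop, hy, Bool.false_eq_true, if_false]
      exact ih (fun z hz => h z (by simp [hz])) rest (idx + 1) st

lemma skip_zero (m : Int) (ys : List Int) (h : ∀ y ∈ ys, (y == 0) = true) :
    ∀ rest idx s st, zvLoop m (ys ++ rest) idx (some s) st = zvLoop m rest (idx + ys.length) (some s) st := by
  induction ys with
  | nil => intro rest idx s st; simp
  | cons y ys ih =>
      intro rest idx s st
      have hy : (y == 0) = true := h y (by simp)
      have he : idx + (((y :: ys).length : Nat) : Int) = (idx + 1) + (ys.length : Int) := by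
        simp only [List.length_cons]; push_cast; ring
      rw [he]
      simp only [List.cons_append, zvLoop, hy, if_true]
      exact ih (fun z hz => h z (by simp [hz])) rest (idx + 1) s st

lemma main_aux (m : Int) : ∀ (k : Nat) (xs : List Int), xs.length ≤ k →
    ∀ (idx : Int) (st : List (Int × Int)),
      aFin m (idx + xs.length) (zvLoop m xs idx none st)
        = ((zvGroups xs).foldl (zstep m) (st, idx)).1 := by
  intro k
  induction k with
  | zero =>
      intro xs hlen idx st
      have hx : xs = [] := List.length_eq_zero_iff.mp (Nat.le_zero.mp hlen)
      subst hx
      simp [zvLoop, zvGroups_nil, aFin]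
  | succ k ih =>
      intro xs hlen idx st
      cases xs with
      | nil => simp [zvLoop, zvGroups_nil, aFin]
      | cons x xs =>
        have hxslen : xs.length ≤ k := by simpa using hlen
        have hgr := zvGroups_cons x xs
        cases hbv : (x == 0) with
        | false =>
          rw [hbv] at hgr
          have hnle : countLead false xs ≤ xs.length := countLead_le false xs
          have htk : ∀ y ∈ xs.take (countLead false xs), (y == 0) = false := by
            intro y hy
            have := mem_take_countLead (x == 0) xs
            rw [hbv] at this
            exact this y hy
          have htklen : (xs.take (countLead false xs)).length = countLead false xs := by
            simp [List.length_take, hnle]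
          have h1 : zvLoop m (x :: xs) idx none st = zvLoop m xs (idx + 1) none st := by
            simp [zvLoop, hbv]
          have h2 : zvLoop m xs (idx + 1) none st
              = zvLoop m (xs.drop (countLead false xs)) (idx + 1 + countLead false xs) none st := by
            conv_lhs => rw [← List.take_append_drop (countLead false xs) xs]
            rw [skip_nonzero m (xs.take (countLead false xs)) htk _ (idx + 1) st, htklen]
          have hidx : idx + (((x :: xs).length : Nat) : Int)
              = (idx + 1 + countLead false xs) + (((xs.drop (countLead false xs)).length : Nat) : Int) := by
            simp only [List.length_cons, List.length_drop]
            push_cast [hnle]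
            ring
          rw [h1, h2, hidx, ih (xs.drop (countLead false xs)) (by simp; omega) _ st, hgr]
          simp only [List.foldl_cons]
          have hz : zstep m (st, idx) (false, countLead false xs + 1)
              = (st, idx + 1 + countLead false xs) := by
            have hB : idx + ((countLead false xs + 1 : Nat) : Int)
                = idx + 1 + (countLead false xs : Int) := by push_cast; ring
            simp only [zstep, Bool.false_and]
            rw [hB]
            simp
          rw [hz]
        | true =>
          rw [hbv] at hgr
          have hnle : countLead true xs ≤ xs.length := countLead_le true xs
          have htk : ∀ y ∈ xs.take (countLead true xs), (y == 0) = true := by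
            intro y hy
            have := mem_take_countLead (x == 0) xs
            rw [hbv] at this
            exact this y hy
          have htklen : (xs.take (countLead true xs)).length = countLead true xs := by
            simp [List.length_take, hnle]
          have h1 : zvLoop m (x :: xs) idx none st = zvLoop m xs (idx + 1) (some idx) st := by
            simp [zvLoop, hbv]
          have h2 : zvLoop m xs (idx + 1) (some idx) st
              = zvLoop m (xs.drop (countLead true xs)) (idx + 1 + countLead true xs) (some idx) st := by
            conv_lhs => rw [← List.take_append_drop (countLead true xs) xs]
            rw [skip_zero m (xs.take (countLead true xs)) htk _ (idx + 1) idx st, htklen]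
          cases hd : xs.drop (countLead true xs) with
          | nil =>
            have hlen2 : xs.length = countLead true xs := by
              have := congrArg List.length hd
              simp at this
              omega
            have hidx : idx + (((x :: xs).length : Nat) : Int) = idx + 1 + countLead true xs := by
              simp only [List.length_cons, hlen2]
              push_cast
              ring
            rw [h1, h2, hd, hidx, hgr, hd]
            simp only [zvLoop, zvGroups_nil, List.foldl_cons, List.foldl_nil]
            simp only [aFin, zstep, Bool.true_and]
            by_cases hc : ((countLead true xs + 1 : Nat) : Int) ≥ m
            · rw [if_pos (by push_cast at hc ⊢; omega), if_pos (decide_eq_true hc)]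
              simp only []
              congr 2
              push_cast
              ring
            · rw [if_neg (by push_cast at hc ⊢; omega), if_neg (by simpa using hc)]
          | cons y ys =>
            have hy0 : (y == 0) = false := by
              have := drop_countLead_head true xs y ys hd
              simpa using this
            have hlend : ys.length + 1 = xs.length - countLead true xs := by
              have := congrArg List.length hd
              simp at this
              omega
            have h3 : zvLoop m (y :: ys) (idx + 1 + countLead true xs) (some idx) st
                = zvLoop m ys (idx + 1 + countLead true xs + 1) none
                    (if idx + 1 + (countLead true xs : Int) - idx ≥ m
                      then st ++ [(idx, idx + 1 + (countLead true xs : Int) - 1)] else st) := by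
              simp [zvLoop, hy0]
            have h4 : zvLoop m (y :: ys) (idx + 1 + countLead true xs) none
                    (if idx + 1 + (countLead true xs : Int) - idx ≥ m
                      then st ++ [(idx, idx + 1 + (countLead true xs : Int) - 1)] else st)
                = zvLoop m ys (idx + 1 + countLead true xs + 1) none
                    (if idx + 1 + (countLead true xs : Int) - idx ≥ m
                      then st ++ [(idx, idx + 1 + (countLead true xs : Int) - 1)] else st) := by
              simp [zvLoop, hy0]
            have hidx : idx + (((x :: xs).length : Nat) : Int)
                = (idx + 1 + countLead true xs) + (((y :: ys).length : Nat) : Int) := by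
              simp only [List.length_cons]
              push_cast
              omega
            have hlen3 : (y :: ys).length ≤ k := by
              simp only [List.length_cons]
              omega
            rw [h1, h2, hd, h3, ← h4, hidx, ih (y :: ys) hlen3 _ _, hgr, hd]
            simp only [List.foldl_cons]
            have hz : zstep m (st, idx) (true, countLead true xs + 1)
                = (if idx + 1 + (countLead true xs : Int) - idx ≥ m
                    then st ++ [(idx, idx + 1 + (countLead true xs : Int) - 1)] else st,
                   idx + 1 + countLead true xs) := by
              have hA : idx + ((countLead true xs + 1 : Nat) : Int) - 1
                  = idx + 1 + (countLead true xs : Int) - 1 := by push_cast; ring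
              have hB : idx + ((countLead true xs + 1 : Nat) : Int)
                  = idx + 1 + (countLead true xs : Int) := by push_cast; ring
              simp only [zstep, Bool.true_and]
              by_cases hc : ((countLead true xs + 1 : Nat) : Int) ≥ m
              · rw [if_pos (decide_eq_true hc), if_pos (by push_cast at hc ⊢; omega), hA, hB]
              · rw [if_neg (by simpa using hc), if_neg (by push_cast at hc ⊢; omega), hB]
            rw [hz]

-- foldl over groups = selected runs
lemma foldl_sel (m : Int) : ∀ (gs : List (Bool × Nat)) (st : List (Int × Int)) (off : Int),
    (gs.foldl (zstep m) (st, off)).1 = st ++ selRuns m off gs := by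
  intro gs
  induction gs with
  | nil => intro st off; simp [selRuns]
  | cons g gs ih =>
      intro st off
      obtain ⟨b, n⟩ := g
      simp only [List.foldl_cons, selRuns]
      by_cases hc : (b && decide ((n : Int) ≥ m)) = true
      · rw [if_pos hc]
        simp only [zstep, hc, if_true]
        rw [ih]
        simp
      · rw [if_neg hc]
        simp only [zstep, hc, if_false]
        rw [ih]
        simp

-- filtering the runs by length = selected runs
lemma filter_runs (m : Int) : ∀ (gs : List (Bool × Nat)) (off : Int),
    (runsN off gs).filter (fun se => decide (se.2 - se.1 + 1 ≥ m)) = selRuns m off gs := by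
  intro gs
  induction gs with
  | nil => intro off; simp [runsN, selRuns]
  | cons g gs ih =>
      intro off
      obtain ⟨b, n⟩ := g
      simp only [runsN, selRuns, List.filter_append]
      rw [ih]
      congr 1
      cases b with
      | false => simp
      | true =>
          have hiff : (off + (n : Int) - 1 - off + 1 ≥ m) ↔ ((n : Int) ≥ m) := by omega
          by_cases hc : (n : Int) ≥ m
          · simp [List.filter, hiff, hc]
          · simp [List.filter, hiff, hc]

-- B's starts comprehension = sAux
lemma starts_eq_sAux : ∀ (vs : List Int) (p : Int) (i : Int),
    (PySem.List.enumerate (List.zip (p :: vs) vs) i).filterMap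
        (fun iv => if iv.2.2 == 0 && !(iv.2.1 == 0) then some iv.1 else none)
      = sAux i p vs := by
  intro vs
  induction vs with
  | nil => intro p i; simp [sAux, PySem.List.enumerate_nil]
  | cons y ys ih =>
      intro p i
      simp only [List.zip_cons_cons, PySem.List.enumerate_cons, List.filterMap_cons, sAux]
      by_cases hc : (y == 0 && !(p == 0)) = true
      · rw [if_pos hc, ih]
        simp [hc]
      · rw [if_neg hc, ih]
        simp [hc]

-- B's ends comprehension = eAux
lemma ends_eq_eAux : ∀ (vs : List Int) (i : Int),
    (PySem.List.enumerate (List.zip vs (vs.tail ++ [1])) i).filterMap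
        (fun iv => if iv.2.1 == 0 && !(iv.2.2 == 0) then some iv.1 else none)
      = eAux i vs := by
  intro vs
  induction vs with
  | nil => intro i; simp [eAux, PySem.List.enumerate_nil]
  | cons y ys ih =>
      intro i
      cases ys with
      | nil =>
          by_cases hy : y = 0 <;>
            simp [eAux, hy, PySem.List.enumerate_cons, PySem.List.enumerate_nil]
      | cons z zs =>
          have ht : zs ++ [1] = (z :: zs).tail ++ [1] := by simp
          simp only [List.tail_cons, List.cons_append, List.zip_cons_cons,
            PySem.List.enumerate_cons, List.filterMap_cons]
          rw [ht, ih (i + 1)]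
          by_cases hy : (y == 0 && !(z == 0)) = true <;> simp [eAux, hy]

-- skipping a nonzero block in sAux
lemma sAux_skip_nonzero : ∀ (ys : List Int), (∀ y ∈ ys, ¬ y = 0) →
    ∀ (rest : List Int) (i p : Int), ¬ p = 0 →
      ∃ q, ¬ q = 0 ∧ sAux i p (ys ++ rest) = sAux (i + ys.length) q rest := by
  intro ys
  induction ys with
  | nil => intro _ rest i p hp; exact ⟨p, hp, by simp⟩
  | cons y ys ih =>
      intro h rest i p hp
      have hy : ¬ y = 0 := h y (by simp)
      obtain ⟨q, hq, he⟩ := ih (fun z hz => h z (by simp [hz])) rest (i + 1) y hy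
      refine ⟨q, hq, ?_⟩
      have : sAux i p ((y :: ys) ++ rest) = sAux (i + 1) y (ys ++ rest) := by
        simp [sAux, hy]
      rw [this, he]
      congr 1
      simp only [List.length_cons]
      push_cast
      ring

-- skipping a zero block in sAux with prev already zero
lemma sAux_skip_zero : ∀ (ys : List Int), (∀ y ∈ ys, y = 0) →
    ∀ (rest : List Int) (i : Int), sAux i 0 (ys ++ rest) = sAux (i + ys.length) 0 rest := by
  intro ys
  induction ys with
  | nil => intro _ rest i; simp
  | cons y ys ih =>
      intro h rest i
      have hy : y = 0 := h y (by simp)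
      subst hy
      have : sAux i 0 ((0 :: ys) ++ rest) = sAux (i + 1) 0 (ys ++ rest) := by
        simp [sAux]
      rw [this, ih (fun z hz => h z (by simp [hz])) rest (i + 1)]
      congr 1
      simp only [List.length_cons]
      push_cast
      ring

-- the prev value is irrelevant when the next element is nonzero
lemma sAux_prev_irrel (r : Int) (t : List Int) (i p q : Int) (hr : ¬ r = 0) :
    sAux i p (r :: t) = sAux i q (r :: t) := by
  simp [sAux, hr]

-- skipping a nonzero block in eAux
lemma eAux_skip_nonzero : ∀ (ys : List Int), (∀ y ∈ ys, ¬ y = 0) →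
    ∀ (rest : List Int) (i : Int), eAux i (ys ++ rest) = eAux (i + ys.length) rest := by
  intro ys
  induction ys with
  | nil => intro _ rest i; simp
  | cons y ys ih =>
      intro h rest i
      have hy : ¬ y = 0 := h y (by simp)
      have : eAux i ((y :: ys) ++ rest) = eAux (i + 1) (ys ++ rest) := by
        simp [eAux, hy]
      rw [this, ih (fun z hz => h z (by simp [hz])) rest (i + 1)]
      congr 1
      simp only [List.length_cons]
      push_cast
      ring

-- a zero block followed by the end or a nonzero emits exactly its last index
lemma eAux_skip_zero : ∀ (ys : List Int), (∀ y ∈ ys, y = 0) →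
    ∀ (rest : List Int), (rest = [] ∨ ∃ r t, rest = r :: t ∧ ¬ r = 0) →
      ∀ (i : Int), eAux i (ys ++ rest)
        = (if ys.isEmpty then [] else [i + ys.length - 1]) ++ eAux (i + ys.length) rest := by
  intro ys
  induction ys with
  | nil => intro _ rest _ i; simp
  | cons y ys ih =>
      intro h rest hrest i
      have hy : y = 0 := h y (by simp)
      subst hy
      cases ys with
      | nil =>
          have hhead : ¬ (([] ++ rest : List Int).headD 1) = 0 := by
            rcases hrest with rfl | ⟨r, t, rfl, hr⟩
            · simp
            · simpa using hr
          simp only [List.cons_append, eAux, List.nil_append] at *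
          have hc : ((0 : Int) == 0 && !((rest.headD 1) == 0)) = true := by
            simp only [beq_self_eq_true, Bool.true_and, Bool.not_eq_eq_eq_not, Bool.not_false]
            simpa using hhead
          rw [hc]
          simp
      | cons z zs =>
          have hz : z = 0 := h z (by simp)
          subst hz
          have hhead : (((0 : Int) :: zs) ++ rest).headD 1 = 0 := by simp
          have step : eAux i ((0 :: 0 :: zs) ++ rest) = eAux (i + 1) ((0 :: zs) ++ rest) := by
            simp only [List.cons_append, eAux, List.headD, hhead]
            simp
          rw [step, ih (fun w hw => h w (by simp at hw ⊢; tauto)) rest hrest (i + 1)]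
          have hlen : i + 1 + ((0 :: zs : List Int).length : Int) = i + ((0 :: 0 :: zs : List Int).length : Int) := by
            simp only [List.length_cons]
            push_cast
            ring
          simp only [List.isEmpty_cons, if_false]
          rw [hlen]
          simp

-- sAux over the group decomposition = the run starts
lemma sAux_runs : ∀ (k : Nat) (vs : List Int), vs.length ≤ k →
    ∀ (i p : Int), ¬ p = 0 → sAux i p vs = (runsN i (zvGroups vs)).map Prod.fst := by
  intro k
  induction k with
  | zero =>
      intro vs hlen i p hp
      have hv : vs = [] := List.length_eq_zero_iff.mp (Nat.le_zero.mp hlen)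
      subst hv
      simp [sAux, zvGroups_nil, runsN]
  | succ k ih =>
      intro vs hlen i p hp
      cases vs with
      | nil => simp [sAux, zvGroups_nil, runsN]
      | cons x xs =>
        have hgr := zvGroups_cons x xs
        cases hbv : (x == 0) with
        | false =>
          rw [hbv] at hgr
          have hx : ¬ x = 0 := by simpa using hbv
          set n := countLead false xs with hn
          have hnle : n ≤ xs.length := countLead_le false xs
          have htk : ∀ y ∈ xs.take n, ¬ y = 0 := by
            intro y hy
            have := mem_take_countLead (x == 0) xs y (by rw [hbv, ← hn]; exact hy)
            rw [hbv] at this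
            simpa using this
          have hblock : ∀ y ∈ x :: xs.take n, ¬ y = 0 := by
            intro y hy
            rcases List.mem_cons.mp hy with rfl | hy
            · exact hx
            · exact htk y hy
          obtain ⟨q, hq, he⟩ := sAux_skip_nonzero (x :: xs.take n) hblock (xs.drop n) i p hp
          have hsplit : (x :: xs.take n) ++ xs.drop n = x :: xs := by
            simp [List.take_append_drop]
          rw [hsplit] at he
          have hlen2 : (xs.drop n).length ≤ k := by
            simp only [List.length_drop]
            have := hlen
            simp only [List.length_cons] at this
            omega
          rw [he, ih (xs.drop n) hlen2 _ q hq, hgr]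
          simp only [runsN, List.nil_append]
          congr 2
          simp only [List.length_cons, List.length_take, min_eq_left hnle]
          try push_cast
          try ring
        | true =>
          rw [hbv] at hgr
          have hx : x = 0 := by simpa using hbv
          subst hx
          set n := countLead true xs with hn
          have hnle : n ≤ xs.length := countLead_le true xs
          have htk : ∀ y ∈ xs.take n, y = 0 := by
            intro y hy
            have := mem_take_countLead true xs y hy
            simpa using this
          have hstep : sAux i p ((0 : Int) :: xs) = i :: sAux (i + 1) 0 (xs.take n ++ xs.drop n) := by
            have hp' : ¬ (p == (0 : Int)) = true := by simpa using hp
            simp only [sAux, List.take_append_drop]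
            simp [hp']
          have hskip := sAux_skip_zero (xs.take n) htk (xs.drop n) (i + 1)
          have hlen2 : (xs.drop n).length ≤ k := by
            simp only [List.length_drop]
            have := hlen
            simp only [List.length_cons] at this
            omega
          have htail : sAux (i + 1 + ((xs.take n).length : Int)) 0 (xs.drop n)
              = (runsN (i + 1 + ((xs.take n).length : Int)) (zvGroups (xs.drop n))).map Prod.fst := by
            cases hd : xs.drop n with
            | nil => simp [sAux, zvGroups_nil, runsN]
            | cons r t =>
                have hr : ¬ r = 0 := by
                  have := drop_countLead_head true xs r t hd
                  simpa using this
                rw [sAux_prev_irrel r t _ 0 1 hr]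
                exact ih (r :: t) (by rw [← hd]; exact hlen2) _ 1 (by norm_num)
          rw [hstep, hskip, htail, hgr]
          simp only [runsN, List.cons_append, List.nil_append, List.map_cons]
          congr 1
          congr 2
          simp only [List.length_take, min_eq_left hnle]
          try push_cast
          try ring

-- eAux over the group decomposition = the run ends
lemma eAux_runs : ∀ (k : Nat) (vs : List Int), vs.length ≤ k →
    ∀ (i : Int), eAux i vs = (runsN i (zvGroups vs)).map Prod.snd := by
  intro k
  induction k with
  | zero =>
      intro vs hlen i
      have hv : vs = [] := List.length_eq_zero_iff.mp (Nat.le_zero.mp hlen)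
      subst hv
      simp [eAux, zvGroups_nil, runsN]
  | succ k ih =>
      intro vs hlen i
      cases vs with
      | nil => simp [eAux, zvGroups_nil, runsN]
      | cons x xs =>
        have hgr := zvGroups_cons x xs
        cases hbv : (x == 0) with
        | false =>
          rw [hbv] at hgr
          have hx : ¬ x = 0 := by simpa using hbv
          set n := countLead false xs with hn
          have hnle : n ≤ xs.length := countLead_le false xs
          have hblock : ∀ y ∈ x :: xs.take n, ¬ y = 0 := by
            intro y hy
            rcases List.mem_cons.mp hy with rfl | hy
            · exact hx
            · have := mem_take_countLead (x == 0) xs y (by rw [hbv, ← hn]; exact hy)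
              rw [hbv] at this
              simpa using this
          have hsplit : (x :: xs.take n) ++ xs.drop n = x :: xs := by
            simp [List.take_append_drop]
          have hskip := eAux_skip_nonzero (x :: xs.take n) hblock (xs.drop n) i
          rw [hsplit] at hskip
          have hlen2 : (xs.drop n).length ≤ k := by
            simp only [List.length_drop]
            have := hlen
            simp only [List.length_cons] at this
            omega
          rw [hskip, ih (xs.drop n) hlen2 _, hgr]
          simp only [runsN, List.nil_append]
          congr 2
          simp only [List.length_cons, List.length_take, min_eq_left hnle]
          try push_cast
          try ring
        | true =>
          rw [hbv] at hgr
          have hx : x = 0 := by simpa using hbv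
          subst hx
          set n := countLead true xs with hn
          have hnle : n ≤ xs.length := countLead_le true xs
          have hblock : ∀ y ∈ (0 : Int) :: xs.take n, y = 0 := by
            intro y hy
            rcases List.mem_cons.mp hy with rfl | hy
            · rfl
            · have := mem_take_countLead true xs y hy
              simpa using this
          have hrest : xs.drop n = [] ∨ ∃ r t, xs.drop n = r :: t ∧ ¬ r = 0 := by
            cases hd : xs.drop n with
            | nil => exact Or.inl rfl
            | cons r t =>
                refine Or.inr ⟨r, t, rfl, ?_⟩
                have := drop_countLead_head true xs r t hd
                simpa using this
          have hsplit : ((0 : Int) :: xs.take n) ++ xs.drop n = (0 : Int) :: xs := by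
            simp [List.take_append_drop]
          have hskip := eAux_skip_zero ((0 : Int) :: xs.take n) hblock (xs.drop n) hrest i
          rw [hsplit] at hskip
          have hlen2 : (xs.drop n).length ≤ k := by
            simp only [List.length_drop]
            have := hlen
            simp only [List.length_cons] at this
            omega
          rw [hskip, ih (xs.drop n) hlen2 _, hgr]
          simp only [runsN, List.isEmpty_cons, if_false, List.cons_append, List.nil_append,
            List.map_cons, List.map_append]
          have hlc : ((0 : Int) :: xs.take n : List Int).length = n + 1 := by
            simp [List.length_take, min_eq_left hnle]
          rw [hlc]
          congr 2 <;> try (congr 1) <;> try push_cast <;> try ring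

lemma zip_map_fst_snd : ∀ (rs : List (Int × Int)), (rs.map Prod.fst).zip (rs.map Prod.snd) = rs := by
  intro rs
  induction rs with
  | nil => rfl
  | cons r rs ih => simp [ih]

-- ===== VERDICT (by name: the statement is the Claim_ definition above) =====
theorem zero_value_streaks_py_spec : Claim_equal_zero_value_streaks_py := by
  intro values min_len _
  unfold Spec_zero_value_streaks_py zero_value_streaks_py zero_value_streaks_py_alt
  have hA : (match zvLoop min_len values 0 none [] with
      | (streaks, some s) =>
          if (values.length : Int) - s ≥ min_len then streaks ++ [(s, (values.length : Int) - 1)] else streaks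
      | (streaks, none) => streaks)
      = ((zvGroups values).foldl (zstep min_len) ([], 0)).1 := by
    have h := main_aux min_len values.length values (le_refl _) 0 []
    rw [← h]
    cases hz : zvLoop min_len values 0 none [] with
    | mk st start =>
      cases start with
      | none => simp [aFin]
      | some s =>
        simp only [aFin]
        norm_num
  rw [hA, foldl_sel, List.nil_append]
  rw [starts_eq_sAux values 1 0, ends_eq_eAux values 0]
  rw [sAux_runs values.length values (le_refl _) 0 1 (by norm_num),
      eAux_runs values.length values (le_refl _) 0]
  simp only [zip_map_fst_snd, filter_runs]
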